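-- pv_equiv track=rewrite | github.com/LumpyStructure/Advent-of-Code-2024 | Day 3/Day 3.py | get_do_sequences
-- ===== SOURCE A (Python) =====
-- def get_do_sequences(memory: str) -> str:
--     """Returns a string of the do() sections of memory"""
--     do_split_mem = memory.split("do()")  # Split on each do() command
--
--     # Split on each dont() command in each do() section
--     dont_split_mem = []
--     for mem_seq in do_split_mem:
--         dont_split_mem.append(mem_seq.split("don't"))
--
--     # Take the do() section of each do()dont() slice
--     final_split_mem = []
--     for mem_seq in dont_split_mem:
--         final_split_mem.append(mem_seq[0])
--
--     # Return as one string
--     return "".join(final_split_mem)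
-- ===== SOURCE B (Python) =====
-- def get_do_sequences(memory: str) -> str:
--     """Single left-to-right scan with an 'enabled' flag instead of three split/list passes."""
--     out = []
--     enabled = True
--     i = 0
--     n = len(memory)
--     while i < n:
--         if memory.startswith("do()", i):
--             enabled = True
--             i += 4
--         elif memory.startswith("don't", i):
--             enabled = False
--             i += 5
--         else:
--             if enabled:
--                 out.append(memory[i])
--             i += 1
--     return "".join(out)
-- ===== Notes on version B (the rewrite author's own statement) =====
-- stated objective: alternative
-- what changed: Replaced the three split/append passes (split on 'do()', split each piece on "don't", take each head, join) by a single left-to-right scan that keeps an enabled flag and emits characters only while enabled.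
import Mathlib
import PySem

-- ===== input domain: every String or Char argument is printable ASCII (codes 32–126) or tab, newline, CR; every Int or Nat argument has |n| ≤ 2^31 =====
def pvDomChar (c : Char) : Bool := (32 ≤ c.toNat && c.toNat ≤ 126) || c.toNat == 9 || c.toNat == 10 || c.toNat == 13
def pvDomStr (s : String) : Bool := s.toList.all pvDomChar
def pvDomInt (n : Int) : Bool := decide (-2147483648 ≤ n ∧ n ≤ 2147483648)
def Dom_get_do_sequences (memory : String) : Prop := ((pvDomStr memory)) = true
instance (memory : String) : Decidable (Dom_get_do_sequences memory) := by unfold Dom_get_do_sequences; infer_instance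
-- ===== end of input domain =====

-- B replaces A's three split/list passes by one left-to-right scan with an 'enabled' flag (alternative algorithm, same result).

-- ===== PORT A =====
def get_do_sequences (memory : String) : String :=
  let do_split_mem := PySem.Chars.splitOn memory.toList "do()".toList
  -- for mem_seq in do_split_mem: append mem_seq.split("don't")
  let dont_split_mem := do_split_mem.foldl (fun acc mem_seq => acc ++ [PySem.Chars.splitOn mem_seq "don't".toList]) []
  -- mem_seq[0]: str.split never returns an empty list, so index 0 never raises; headD [] is exact here
  let final_split_mem := dont_split_mem.foldl (fun acc mem_seq => acc ++ [mem_seq.headD []]) []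
  String.ofList (PySem.Chars.join [] final_split_mem)

-- ===== PORT B =====
-- the while loop of Source B: structural recursion on the remaining characters, state = the 'enabled' flag
def pvScan : List Char → Bool → List Char
  | [], _ => []
  | c :: rest, enabled =>
    if "do()".toList.isPrefixOf (c :: rest) then
      pvScan ((c :: rest).drop 4) true
    else if "don't".toList.isPrefixOf (c :: rest) then
      pvScan ((c :: rest).drop 5) false
    else if enabled then c :: pvScan rest enabled else pvScan rest enabled
termination_by l _ => l.length
decreasing_by all_goals (first | (simp; omega) | simp)

def get_do_sequences_alt (memory : String) : String :=
  String.ofList (pvScan memory.toList true)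

-- ===== PRECONDITION & SPEC =====
def Spec_get_do_sequences (memory : String) (out : String) : Prop := out = get_do_sequences_alt memory
instance (memory : String) (out : String) : Decidable (Spec_get_do_sequences memory out) := by unfold Spec_get_do_sequences; infer_instance

-- ===== CLAIM (what is proved, stated in full; the proofs are below) =====
def Claim_equal_get_do_sequences : Prop := ∀ (memory : String), Dom_get_do_sequences memory → Spec_get_do_sequences memory (get_do_sequences memory)

-- ===== LEMMAS AND PROOFS =====

-- clean (accumulator-free) form of PySem.Chars.splitOn
def pvParts (sep : List Char) : List Char → List (List Char)
  | [] => [[]]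
  | c :: rest =>
    if sep.isPrefixOf (c :: rest) then [] :: pvParts sep ((c :: rest).drop (max sep.length 1))
    else (pvParts sep rest).modifyHead (c :: ·)
termination_by l => l.length
decreasing_by all_goals (first | (simp; omega) | simp)

-- accumulator form mirroring splitOn.go (without fuel)
def pvSp (sep : List Char) : List Char → List Char → List (List Char) → List (List Char)
  | [], cur, acc => (cur.reverse :: acc).reverse
  | c :: rest, cur, acc =>
    if sep.isPrefixOf (c :: rest) then pvSp sep ((c :: rest).drop (max sep.length 1)) [] (cur.reverse :: acc)
    else pvSp sep rest (c :: cur) acc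
termination_by l => l.length
decreasing_by all_goals (first | (simp; omega) | simp)

-- prefix of l before the first occurrence of sep
def pvTu (sep : List Char) : List Char → List Char
  | [] => []
  | c :: rest => if sep.isPrefixOf (c :: rest) then [] else c :: pvTu sep rest

lemma pvParts_nil (sep : List Char) : pvParts sep [] = [[]] := by rw [pvParts]

lemma pvParts_cons (sep : List Char) (c : Char) (rest : List Char) :
    pvParts sep (c :: rest) =
      if sep.isPrefixOf (c :: rest) then [] :: pvParts sep ((c :: rest).drop (max sep.length 1))
      else (pvParts sep rest).modifyHead (c :: ·) := by rw [pvParts]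

lemma pvSp_nil (sep cur : List Char) (acc : List (List Char)) :
    pvSp sep [] cur acc = (cur.reverse :: acc).reverse := by rw [pvSp]

lemma pvSp_cons (sep : List Char) (c : Char) (rest cur : List Char) (acc : List (List Char)) :
    pvSp sep (c :: rest) cur acc =
      if sep.isPrefixOf (c :: rest) then pvSp sep ((c :: rest).drop (max sep.length 1)) [] (cur.reverse :: acc)
      else pvSp sep rest (c :: cur) acc := by rw [pvSp]

lemma pvScan_nil (b : Bool) : pvScan [] b = [] := by rw [pvScan]

lemma pvScan_cons (c : Char) (rest : List Char) (b : Bool) :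
    pvScan (c :: rest) b =
      if "do()".toList.isPrefixOf (c :: rest) then pvScan ((c :: rest).drop 4) true
      else if "don't".toList.isPrefixOf (c :: rest) then pvScan ((c :: rest).drop 5) false
      else if b then c :: pvScan rest b else pvScan rest b := by rw [pvScan]

lemma pvParts_ne_nil_aux (sep : List Char) :
    ∀ (n : Nat) (l : List Char), l.length ≤ n → pvParts sep l ≠ [] := by
  intro n
  induction n with
  | zero =>
    intro l hl
    have : l = [] := by cases l <;> simp_all
    subst this
    simp [pvParts_nil]
  | succ m ih =>
    intro l hl
    cases l with
    | nil => simp [pvParts_nil]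
    | cons c rest =>
      rw [pvParts_cons]
      split_ifs
      · simp
      · obtain ⟨p, t, hpt⟩ : ∃ p t, pvParts sep rest = p :: t := by
          cases h : pvParts sep rest with
          | nil => exact absurd h (ih rest (by simp at hl; omega))
          | cons p t => exact ⟨p, t, rfl⟩
        simp [hpt, List.modifyHead]

lemma pvParts_ne_nil (sep l : List Char) : pvParts sep l ≠ [] :=
  pvParts_ne_nil_aux sep l.length l le_rfl

-- splitOn.go with enough fuel computes pvSp
lemma pvGo_eq (sep : List Char) (hsep : sep ≠ []) :
    ∀ (fuel : Nat) (l cur : List Char) (acc : List (List Char)), l.length < fuel →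
      PySem.Chars.splitOn.go sep fuel l cur acc = pvSp sep l cur acc := by
  intro fuel
  induction fuel with
  | zero => intro l cur acc h; omega
  | succ f ih =>
    intro l cur acc h
    cases l with
    | nil => rw [PySem.Chars.splitOn.go, pvSp_nil]; omega
    | cons c rest =>
      rw [PySem.Chars.splitOn.go, pvSp_cons]
      have hmax : max sep.length 1 = sep.length := by
        have : 1 ≤ sep.length := by
          cases sep with | nil => exact absurd rfl hsep | cons _ _ => simp
        omega
      split_ifs with hp
      · rw [hmax]
        apply ih
        have : 1 ≤ sep.length := by
          cases sep with | nil => exact absurd rfl hsep | cons _ _ => simp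
        simp at h ⊢
        omega
      · apply ih
        simp at h ⊢
        omega

lemma pvSp_eq_parts (sep : List Char) :
    ∀ (n : Nat) (l : List Char), l.length ≤ n → ∀ (cur : List Char) (acc : List (List Char)),
      pvSp sep l cur acc = acc.reverse ++ (pvParts sep l).modifyHead (fun p => cur.reverse ++ p) := by
  intro n
  induction n with
  | zero =>
    intro l hl cur acc
    have : l = [] := by cases l <;> simp_all
    subst this
    simp [pvSp_nil, pvParts_nil, List.modifyHead]
  | succ m ih =>
    intro l hl cur acc
    cases l with
    | nil => simp [pvSp_nil, pvParts_nil, List.modifyHead]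
    | cons c rest =>
      rw [pvSp_cons, pvParts_cons]
      split_ifs with hp
      · rw [ih ((c :: rest).drop (max sep.length 1)) (by simp at hl ⊢; omega) [] (cur.reverse :: acc)]
        obtain ⟨p, t, hpt⟩ : ∃ p t, pvParts sep ((c :: rest).drop (max sep.length 1)) = p :: t := by
          cases h : pvParts sep ((c :: rest).drop (max sep.length 1)) with
          | nil => exact absurd h (pvParts_ne_nil _ _)
          | cons p t => exact ⟨p, t, rfl⟩
        simp [hpt, List.modifyHead]
      · rw [ih rest (by simp at hl; omega) (c :: cur) acc]
        obtain ⟨p, t, hpt⟩ : ∃ p t, pvParts sep rest = p :: t := by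
          cases h : pvParts sep rest with
          | nil => exact absurd h (pvParts_ne_nil _ _)
          | cons p t => exact ⟨p, t, rfl⟩
        simp [hpt, List.modifyHead]

lemma pvSplitOn_eq_parts (sep l : List Char) (hsep : sep ≠ []) :
    PySem.Chars.splitOn l sep = pvParts sep l := by
  unfold PySem.Chars.splitOn
  rw [pvGo_eq sep hsep _ _ _ _ (by omega),
      pvSp_eq_parts sep l.length l le_rfl [] []]
  obtain ⟨p, t, hpt⟩ : ∃ p t, pvParts sep l = p :: t := by
    cases h : pvParts sep l with
    | nil => exact absurd h (pvParts_ne_nil _ _)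
    | cons p t => exact ⟨p, t, rfl⟩
  simp [hpt, List.modifyHead]

lemma pvParts_headD (sep : List Char) :
    ∀ (n : Nat) (l : List Char), l.length ≤ n → (pvParts sep l).headD [] = pvTu sep l := by
  intro n
  induction n with
  | zero =>
    intro l hl
    have : l = [] := by cases l <;> simp_all
    subst this
    simp [pvParts_nil, pvTu]
  | succ m ih =>
    intro l hl
    cases l with
    | nil => simp [pvParts_nil, pvTu]
    | cons c rest =>
      rw [pvParts_cons]
      simp only [pvTu]
      split_ifs with hp
      · simp
      · obtain ⟨p, t, hpt⟩ : ∃ p t, pvParts sep rest = p :: t := by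
          cases h : pvParts sep rest with
          | nil => exact absurd h (pvParts_ne_nil _ _)
          | cons p t => exact ⟨p, t, rfl⟩
        have := ih rest (by simp at hl; omega)
        rw [hpt] at this ⊢
        simp [List.modifyHead] at this ⊢
        exact this

lemma pvTu_prefix (sep : List Char) : ∀ (l : List Char), pvTu sep l <+: l := by
  intro l
  induction l with
  | nil => simp [pvTu]
  | cons c rest ih =>
    simp only [pvTu]
    split_ifs
    · exact List.nil_prefix
    · exact List.cons_prefix_cons.mpr ⟨rfl, ih⟩

-- A's value, accumulator-free: the concatenation of the pre-"don't" prefixes of the "do()"-pieces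
def pvAL (l : List Char) : List Char :=
  ((pvParts "do()".toList l).map (pvTu "don't".toList)).flatten

-- the same with the first (currently disabled) piece removed
def pvDL (l : List Char) : List Char :=
  ((pvParts "do()".toList l).tail.map (pvTu "don't".toList)).flatten

lemma pvAL_nil : pvAL [] = [] := by simp [pvAL, pvParts_nil, pvTu]

lemma pvDL_nil : pvDL [] = [] := by simp [pvDL, pvParts_nil]

lemma pvAL_pos (c : Char) (rest : List Char) (h : "do()".toList.isPrefixOf (c :: rest)) :
    pvAL (c :: rest) = pvAL ((c :: rest).drop 4) := by
  unfold pvAL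
  rw [pvParts_cons, if_pos h]
  simp [pvTu]

lemma pvDL_pos (c : Char) (rest : List Char) (h : "do()".toList.isPrefixOf (c :: rest)) :
    pvDL (c :: rest) = pvAL ((c :: rest).drop 4) := by
  unfold pvDL pvAL
  rw [pvParts_cons, if_pos h]
  simp

lemma pvAL_neg (c : Char) (rest : List Char) (h : ¬ "do()".toList.isPrefixOf (c :: rest)) :
    pvAL (c :: rest) = pvTu "don't".toList (c :: pvTu "do()".toList rest) ++ pvDL rest := by
  obtain ⟨p, t, hpt⟩ : ∃ p t, pvParts "do()".toList rest = p :: t := by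
    cases hh : pvParts "do()".toList rest with
    | nil => exact absurd hh (pvParts_ne_nil _ _)
    | cons p t => exact ⟨p, t, rfl⟩
  have hhead : p = pvTu "do()".toList rest := by
    have := pvParts_headD "do()".toList rest.length rest le_rfl
    rw [hpt] at this; simpa using this
  unfold pvAL pvDL
  rw [pvParts_cons, if_neg h, hpt]
  simp [List.modifyHead, hhead]

lemma pvDL_neg (c : Char) (rest : List Char) (h : ¬ "do()".toList.isPrefixOf (c :: rest)) :
    pvDL (c :: rest) = pvDL rest := by
  obtain ⟨p, t, hpt⟩ : ∃ p t, pvParts "do()".toList rest = p :: t := by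
    cases hh : pvParts "do()".toList rest with
    | nil => exact absurd hh (pvParts_ne_nil _ _)
    | cons p t => exact ⟨p, t, rfl⟩
  unfold pvDL
  rw [pvParts_cons, if_neg h, hpt]
  simp [List.modifyHead]

-- shape of a "don't"-headed string
lemma pvDont_shape (c : Char) (rest : List Char)
    (h : "don't".toList.isPrefixOf (c :: rest)) :
    c = 'd' ∧ ∃ r, rest = 'o' :: 'n' :: '\'' :: 't' :: r := by
  have h' : "don't".toList <+: (c :: rest) := List.isPrefixOf_iff_prefix.mp h
  obtain ⟨t, ht⟩ := h'
  have : ('d' :: 'o' :: 'n' :: '\'' :: 't' :: t : List Char) = c :: rest := by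
    simpa using ht
  cases this
  exact ⟨rfl, t, rfl⟩

-- "don't" starts the string iff it starts the pre-"do()" prefix (the interiors of the two tokens share no 'd')
lemma pvTransfer (c : Char) (rest : List Char) :
    "don't".toList.isPrefixOf (c :: pvTu "do()".toList rest) =
      "don't".toList.isPrefixOf (c :: rest) := by
  by_cases h : "don't".toList.isPrefixOf (c :: rest)
  · obtain ⟨hc, r, hr⟩ := pvDont_shape c rest h
    subst hc; subst hr
    simp [pvTu, List.isPrefixOf]
  · have hrhs : "don't".toList.isPrefixOf (c :: rest) = false := Bool.eq_false_iff.mpr h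
    rw [hrhs]
    cases hcon : "don't".toList.isPrefixOf (c :: pvTu "do()".toList rest) with
    | false => rfl
    | true =>
      exact absurd
        (List.isPrefixOf_iff_prefix.mpr
          ((List.isPrefixOf_iff_prefix.mp hcon).trans
            (List.cons_prefix_cons.mpr ⟨rfl, pvTu_prefix _ _⟩)))
        h

lemma pvDL_skip_dont (c : Char) (rest : List Char)
    (h : "don't".toList.isPrefixOf (c :: rest)) :
    pvDL (c :: rest) = pvDL ((c :: rest).drop 5) := by
  obtain ⟨hc, r, hr⟩ := pvDont_shape c rest h
  subst hc; subst hr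
  rw [pvDL_neg _ _ (by simp [List.isPrefixOf]),
      pvDL_neg _ _ (by simp [List.isPrefixOf]),
      pvDL_neg _ _ (by simp [List.isPrefixOf]),
      pvDL_neg _ _ (by simp [List.isPrefixOf]),
      pvDL_neg _ _ (by simp [List.isPrefixOf])]
  simp

-- the main invariant: the scan with enabled=true computes pvAL, with enabled=false computes pvDL
lemma pvScan_eq (n : Nat) : ∀ (l : List Char), l.length ≤ n →
    pvScan l true = pvAL l ∧ pvScan l false = pvDL l := by
  induction n with
  | zero =>
    intro l hl
    have : l = [] := by cases l <;> simp_all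
    subst this
    simp [pvScan_nil, pvAL_nil, pvDL_nil]
  | succ m ih =>
    intro l hl
    cases l with
    | nil => simp [pvScan_nil, pvAL_nil, pvDL_nil]
    | cons c rest =>
      by_cases hdo : "do()".toList.isPrefixOf (c :: rest)
      · have hrec := ih ((c :: rest).drop 4) (by simp at hl ⊢; omega)
        rw [pvScan_cons, if_pos hdo, pvScan_cons, if_pos hdo]
        rw [pvAL_pos c rest hdo, pvDL_pos c rest hdo]
        exact ⟨hrec.1, hrec.1⟩
      · by_cases hdont : "don't".toList.isPrefixOf (c :: rest)
        · have hrec := ih ((c :: rest).drop 5) (by simp at hl ⊢; omega)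
          rw [pvScan_cons, if_neg hdo, if_pos hdont,
              pvScan_cons, if_neg hdo, if_pos hdont]
          constructor
          · rw [pvAL_neg c rest hdo]
            have htu : pvTu "don't".toList (c :: pvTu "do()".toList rest) = [] := by
              rw [pvTu, pvTransfer c rest, if_pos hdont]
            rw [htu, List.nil_append, hrec.2]
            have hskip := pvDL_skip_dont c rest hdont
            rw [pvDL_neg c rest hdo] at hskip
            exact hskip.symm
          · rw [hrec.2, pvDL_skip_dont c rest hdont]
        · have hrec := ih rest (by simp at hl; omega)
          rw [pvScan_cons, if_neg hdo, if_neg hdont,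
              pvScan_cons, if_neg hdo, if_neg hdont]
          constructor
          · rw [if_pos rfl, pvAL_neg c rest hdo]
            have htu : pvTu "don't".toList (c :: pvTu "do()".toList rest) =
                c :: pvTu "don't".toList (pvTu "do()".toList rest) := by
              rw [pvTu, pvTransfer c rest, if_neg hdont]
            rw [htu]
            have hAL : pvAL rest = pvTu "don't".toList (pvTu "do()".toList rest) ++ pvDL rest := by
              cases rest with
              | nil => simp [pvAL_nil, pvDL_nil, pvTu, pvParts_nil]
              | cons d r =>
                by_cases hdo2 : "do()".toList.isPrefixOf (d :: r)
                · have h1 : pvTu "do()".toList (d :: r) = [] := by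
                    rw [pvTu, if_pos hdo2]
                  rw [pvAL_pos d r hdo2, h1, pvDL_pos d r hdo2]
                  simp [pvTu]
                · have h1 : pvTu "do()".toList (d :: r) = d :: pvTu "do()".toList r := by
                    rw [pvTu, if_neg hdo2]
                  rw [pvAL_neg d r hdo2, h1, pvDL_neg d r hdo2]
            rw [hrec.1, hAL]
            simp
          · rw [if_neg (by simp), hrec.2, pvDL_neg c rest hdo]

-- folds of A over `append one element` are maps
lemma pvFoldl_map {α β : Type} (f : α → β) :
    ∀ (l : List α) (acc : List β),
      l.foldl (fun a x => a ++ [f x]) acc = acc ++ l.map f := by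
  intro l
  induction l with
  | nil => simp
  | cons x xs ih => intro acc; simp [ih]

lemma pvJoin_nil_flatten : ∀ (ps : List (List Char)), PySem.Chars.join [] ps = ps.flatten := by
  intro ps
  induction ps with
  | nil => simp [PySem.Chars.join_nil]
  | cons p t ih =>
    cases t with
    | nil => simp [PySem.Chars.join_singleton]
    | cons q u => rw [PySem.Chars.join_cons_cons]; simp_all

-- ===== VERDICT (by name: the statement is the Claim_ definition above) =====
theorem get_do_sequences_spec : Claim_equal_get_do_sequences := by
  intro memory _
  unfold Spec_get_do_sequences get_do_sequences get_do_sequences_alt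
  rw [(pvScan_eq memory.toList.length memory.toList le_rfl).1]
  simp only [pvFoldl_map, List.nil_append, List.map_map]
  rw [pvJoin_nil_flatten]
  unfold pvAL
  rw [pvSplitOn_eq_parts _ _ (by decide)]
  congr 1
  congr 1
  apply List.map_congr_left
  intro p _
  simp only [Function.comp]
  rw [pvSplitOn_eq_parts _ _ (by decide)]
  exact pvParts_headD "don't".toList p.length p le_rfl
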